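-- pv_equiv track=rewrite | github.com/blankroad/agentic-dev-board | src/devboard/tui/process_swimlane.py | _match_lane
-- ===== SOURCE A (Python) =====
-- LANE_MATCHERS: dict[str, tuple[str, ...]] = {
--     "gauntlet": ("gauntlet_complete", "plan", "eng_review"),
--     "tdd": ("tdd_red", "tdd_green", "tdd_refactor"),
--     "review": ("review", "parallel_review"),
--     "cso": ("cso",),
--     "redteam": ("redteam",),
--     "approval": ("approval",),
-- }
--
-- def _match_lane(phase: str) -> str | None:
--     for lane, needles in LANE_MATCHERS.items():
--         if phase in needles:
--             return lane
--     # prefix match fallback (e.g. `tdd_green_carryover` → tdd)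
--     for lane, needles in LANE_MATCHERS.items():
--         for needle in needles:
--             if phase.startswith(needle):
--                 return lane
--     return None
-- ===== SOURCE B (Python) =====
-- LANE_MATCHERS: dict[str, tuple[str, ...]] = {
--     "gauntlet": ("gauntlet_complete", "plan", "eng_review"),
--     "tdd": ("tdd_red", "tdd_green", "tdd_refactor"),
--     "review": ("review", "parallel_review"),
--     "cso": ("cso",),
--     "redteam": ("redteam",),
--     "approval": ("approval",),
-- }
--
-- # Invert the table once: needle -> lane.
-- _LANE_OF = {needle: lane for lane, needles in LANE_MATCHERS.items() for needle in needles}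
-- _MAX_NEEDLE = max(map(len, _LANE_OF))
--
--
-- def _match_lane(phase: str) -> str | None:
--     # Instead of scanning the lane table, probe every prefix of `phase` in the
--     # inverted needle->lane dict.  No needle is a prefix of another needle, so
--     # at most one prefix of `phase` is a key, and the lane found is exactly the
--     # lane the table scans find (an exact match is just the full-length prefix).
--     for i in range(min(len(phase), _MAX_NEEDLE), 0, -1):
--         lane = _LANE_OF.get(phase[:i])
--         if lane is not None:
--             return lane
--     return None
-- ===== Notes on version B (the rewrite author's own statement) =====
-- stated objective: alternative
-- what changed: Inverts the lane table once into a needle->lane dict and then, per call, probes every prefix of the phase string (length-capped at the longest needle) with hash lookups, instead of scanning the whole lane table twice with exact then prefix tests; correct because no needle is a prefix of another needle, so at most one prefix of phase is a key.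
import Mathlib
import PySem

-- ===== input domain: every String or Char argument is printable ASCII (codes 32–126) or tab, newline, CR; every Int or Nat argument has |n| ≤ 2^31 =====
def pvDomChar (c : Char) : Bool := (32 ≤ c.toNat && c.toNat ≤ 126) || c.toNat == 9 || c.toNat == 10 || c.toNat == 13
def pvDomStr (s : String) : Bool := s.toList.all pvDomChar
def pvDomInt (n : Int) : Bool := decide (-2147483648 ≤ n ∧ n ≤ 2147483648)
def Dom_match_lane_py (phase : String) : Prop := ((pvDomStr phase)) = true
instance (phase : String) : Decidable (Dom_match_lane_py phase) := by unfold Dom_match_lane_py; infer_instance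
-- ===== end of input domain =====

-- B inverts the lane table into a needle->lane dict and probes each prefix of the phase
-- string instead of scanning the table twice; objective: alternative algorithm, same cost.

-- ===== PORT A =====
def LANE_MATCHERS : List (String × List String) :=
  [("gauntlet", ["gauntlet_complete", "plan", "eng_review"]),
   ("tdd", ["tdd_red", "tdd_green", "tdd_refactor"]),
   ("review", ["review", "parallel_review"]),
   ("cso", ["cso"]),
   ("redteam", ["redteam"]),
   ("approval", ["approval"])]

-- first loop: exact membership per lane
def pvExactLoop (phase : String) : List (String × List String) → Option String
  | [] => none
  | (lane, needles) :: rest =>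
      if phase ∈ needles then some lane else pvExactLoop phase rest

-- inner loop of the fallback: prefix test per needle
def pvPrefixInner (phase lane : String) : List String → Option String
  | [] => none
  | n :: ns =>
      if PySem.Str.startswith phase n then some lane else pvPrefixInner phase lane ns

-- second loop: prefix fallback per lane
def pvPrefixLoop (phase : String) : List (String × List String) → Option String
  | [] => none
  | (lane, needles) :: rest =>
      match pvPrefixInner phase lane needles with
      | some l => some l
      | none => pvPrefixLoop phase rest

def match_lane_py (phase : String) : Option String :=
  match pvExactLoop phase LANE_MATCHERS with
  | some lane => some lane
  | none => pvPrefixLoop phase LANE_MATCHERS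

-- ===== PORT B =====
-- _LANE_OF = {needle: lane for lane, needles in LANE_MATCHERS.items() for needle in needles}
def NEEDLE_LANE : List (String × String) :=
  LANE_MATCHERS.flatMap (fun p => p.2.map (fun n => (n, p.1)))

def LANE_OF : PySem.Dict String String := PySem.Dict.ofList NEEDLE_LANE

-- _MAX_NEEDLE = max(map(len, _LANE_OF)); the dict is a concrete non-empty literal,
-- so Python's max never raises and the `.getD 0` default is never taken
-- key lengths are nonnegative Ints, so `.toNat` is exact
def MAX_NEEDLE : Nat :=
  ((PySem.List.max? (LANE_OF.keys.map (fun k => PySem.Str.len k)) id).getD 0).toNat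

-- the for-loop `for i in range(start, 0, -1): …` as count-down recursion on i;
-- phase[:i] for 0 ≤ i is `take i` (PySem.List.slice_to_natCast)
def pvProbe (cs : List Char) : Nat → Option String
  | 0 => none
  | i + 1 =>
      match LANE_OF.get? (String.ofList (cs.take (i + 1))) with
      | some lane => some lane
      | none => pvProbe cs i

def match_lane_py_alt (phase : String) : Option String :=
  pvProbe phase.toList (min phase.toList.length MAX_NEEDLE)

-- ===== PRECONDITION & SPEC =====
def Spec_match_lane_py (phase : String) (out : Option String) : Prop := out = match_lane_py_alt phase
instance (phase : String) (out : Option String) : Decidable (Spec_match_lane_py phase out) := by unfold Spec_match_lane_py; infer_instance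

-- ===== CLAIM (what is proved, stated in full; the proofs are below) =====
def Claim_equal_match_lane_py : Prop := ∀ (phase : String), Dom_match_lane_py phase → Spec_match_lane_py phase (match_lane_py phase)

-- ===== LEMMAS AND PROOFS =====

-- table facts (decidable on the concrete table)
lemma pvNoNeedlePrefix : ∀ p ∈ NEEDLE_LANE, ∀ q ∈ NEEDLE_LANE,
    p.1.toList <+: q.1.toList → p = q := by decide

lemma pvNeedleLen : ∀ p ∈ NEEDLE_LANE, 1 ≤ p.1.toList.length ∧ p.1.toList.length ≤ 17 := by
  decide

lemma pvMax17 : MAX_NEEDLE = 17 := by decide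

-- assoc-list lookup: get? on a literal dict is first-match find?
lemma pvGetMk (l : List (String × String)) (s : String) :
    (PySem.Dict.mk l).get? s = (l.find? (fun q => q.1 == s)).map (·.2) := by
  induction l with
  | nil => simp [pysem]
  | cons p rest ih =>
      obtain ⟨k, v⟩ := p
      rw [PySem.Dict.get?_mk_cons]
      by_cases h : k == s
      · simp [List.find?, h]
      · simp only [List.find?, h]
        simpa using ih

lemma pvGetChar (s : String) :
    LANE_OF.get? s = (NEEDLE_LANE.find? (fun q => q.1 == s)).map (·.2) := by
  have h : LANE_OF = PySem.Dict.mk NEEDLE_LANE := by decide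
  rw [h, pvGetMk]

-- A's exact pass returning a lane names a (needle = phase, lane) pair of the flat table
lemma pvExactMem (phase lane : String) :
    ∀ L : List (String × List String), pvExactLoop phase L = some lane →
      (phase, lane) ∈ L.flatMap (fun p => p.2.map (fun n => (n, p.1))) := by
  intro L
  induction L with
  | nil => intro h; simp [pvExactLoop] at h
  | cons p rest ih =>
      obtain ⟨la, ns⟩ := p
      intro h
      rw [pvExactLoop] at h
      by_cases hin : phase ∈ ns
      · simp only [hin, if_pos] at h
        obtain rfl : la = lane := by simpa using h
        exact List.mem_append_left _ (List.mem_map.mpr ⟨phase, hin, rfl⟩)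
      · simp only [hin, if_neg, not_false_iff] at h
        exact List.mem_append_right _ (ih h)

lemma pvInner_flat (phase lane : String) (ns : List String) :
    ((ns.map (fun n => (n, lane))).find? (fun q => PySem.Str.startswith phase q.1)).map (·.2)
      = pvPrefixInner phase lane ns := by
  induction ns with
  | nil => simp [pvPrefixInner]
  | cons n ns ih =>
      simp only [PySem.Str.startswith_eq, List.find?_map, Option.map_map] at ih ⊢
      by_cases h : PySem.Chars.startswith phase.toList n.toList = true <;>
        simp [pvPrefixInner, h, ih]

lemma pvPrefix_flat (phase : String) (L : List (String × List String)) :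
    pvPrefixLoop phase L
      = ((L.flatMap (fun p => p.2.map (fun n => (n, p.1)))).find?
          (fun q => PySem.Str.startswith phase q.1)).map (·.2) := by
  induction L with
  | nil => simp [pvPrefixLoop]
  | cons p rest ih =>
      obtain ⟨lane, ns⟩ := p
      simp only [pvPrefixLoop, List.flatMap_cons, List.find?_append, Option.map]
      cases hin : (ns.map (fun n => (n, lane))).find? (fun q => PySem.Str.startswith phase q.1) with
      | some q =>
          have := pvInner_flat phase lane ns
          rw [hin] at this
          simp [← this]
      | none =>
          have := pvInner_flat phase lane ns
          rw [hin] at this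
          simp [← this, ih, Option.map]

-- a successful dict probe at prefix length j names a needle that is that prefix of cs
lemma pvProbeHit {cs : List Char} {j : Nat} {L : String}
    (h : LANE_OF.get? (String.ofList (cs.take j)) = some L) :
    ∃ n : String, (n, L) ∈ NEEDLE_LANE ∧ n.toList = cs.take j := by
  rw [pvGetChar] at h
  cases hf : NEEDLE_LANE.find? (fun q => q.1 == String.ofList (cs.take j)) with
  | none => rw [hf] at h; simp at h
  | some p =>
      obtain ⟨n', L'⟩ := p
      rw [hf] at h
      simp only [Option.map_some, Option.some_inj] at h
      have hmem := List.mem_of_find?_eq_some hf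
      have hpred := List.find?_some hf
      simp only [beq_iff_eq] at hpred
      exact ⟨n', h ▸ hmem, by rw [hpred, String.toList_ofList]⟩

-- no needle is a prefix of cs → every probe is a miss
lemma pvProbeNone {cs : List Char}
    (h : ∀ p ∈ NEEDLE_LANE, ¬ p.1.toList <+: cs) :
    ∀ i, i ≤ cs.length → pvProbe cs i = none := by
  intro i
  induction i with
  | zero => intro _; rfl
  | succ i ih =>
      intro hle
      rw [pvProbe]
      cases hg : LANE_OF.get? (String.ofList (cs.take (i + 1))) with
      | some L =>
          obtain ⟨n, hmem, hn⟩ := pvProbeHit hg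
          exact absurd (hn ▸ List.take_prefix (i + 1) cs) (h (n, L) hmem)
      | none => exact ih (by omega)

-- (n, L) is a needle prefixing cs → every probe starting at length ≥ |n| returns L
lemma pvProbeSome {cs : List Char} {n L : String}
    (hmem : (n, L) ∈ NEEDLE_LANE) (hpre : n.toList <+: cs) :
    ∀ i, i ≤ cs.length → n.toList.length ≤ i → pvProbe cs i = some L := by
  intro i
  induction i with
  | zero =>
      intro _ h0
      have h1 := (pvNeedleLen (n, L) hmem).1
      simp only at h1
      omega
  | succ i ih =>
      intro hle hlen
      rw [pvProbe]
      cases hg : LANE_OF.get? (String.ofList (cs.take (i + 1))) with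
      | some L' =>
          obtain ⟨n', hmem', hn'⟩ := pvProbeHit hg
          have hpre' : n'.toList <+: cs := hn' ▸ List.take_prefix (i + 1) cs
          have : n'.toList <+: n.toList ∨ n.toList <+: n'.toList :=
            List.prefix_or_prefix_of_prefix hpre' hpre
          have heq : ((n', L') : String × String) = (n, L) := by
            rcases this with h1 | h1
            · exact pvNoNeedlePrefix _ hmem' _ hmem h1
            · exact (pvNoNeedlePrefix _ hmem _ hmem' h1).symm
          simp only [Prod.mk.injEq] at heq
          rw [heq.2]
      | none =>
          -- this probe length cannot be |n|: take |n| cs = n.toList IS a key of the dict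
          have hni : n.toList.length ≠ i + 1 := by
            intro habs
            have htake : cs.take (i + 1) = n.toList := by
              rw [← habs]; exact (List.prefix_iff_eq_take.mp hpre).symm
            have hsome : (NEEDLE_LANE.find?
                (fun q => q.1 == String.ofList (cs.take (i + 1)))).isSome := by
              apply List.find?_isSome.mpr
              refine ⟨(n, L), hmem, ?_⟩
              simp [htake]
            rw [pvGetChar] at hg
            cases hf : NEEDLE_LANE.find? (fun q => q.1 == String.ofList (cs.take (i + 1))) with
            | none => rw [hf] at hsome; simp at hsome
            | some p => rw [hf] at hg; simp at hg
          exact ih (by omega) (by omega)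

-- ===== VERDICT (by name: the statement is the Claim_ definition above) =====
theorem match_lane_py_spec : Claim_equal_match_lane_py := by
  intro phase _
  unfold Spec_match_lane_py match_lane_py match_lane_py_alt
  cases hex : pvExactLoop phase LANE_MATCHERS with
  | some lane =>
      -- phase is itself a needle: B's probe at full length |phase| ≤ MAX_NEEDLE hits it
      have hmem : (phase, lane) ∈ NEEDLE_LANE := pvExactMem phase lane LANE_MATCHERS hex
      have h17 := (pvNeedleLen (phase, lane) hmem).2
      simp only at h17
      rw [pvProbeSome hmem (List.prefix_refl _) _ (min_le_left _ _)
        (le_min (le_refl _) (by rw [pvMax17]; exact h17))]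
  | none =>
      -- phase is not a needle: A is the flat prefix find, and B's probing agrees with it
      rw [pvPrefix_flat]
      cases hf : (LANE_MATCHERS.flatMap (fun p => p.2.map (fun n => (n, p.1)))).find?
          (fun q => PySem.Str.startswith phase q.1) with
      | some p =>
          obtain ⟨n, L⟩ := p
          have hmem' : (n, L) ∈ NEEDLE_LANE := List.mem_of_find?_eq_some hf
          have hpred := List.find?_some hf
          simp only [PySem.Str.startswith_eq] at hpred
          have hpre : n.toList <+: phase.toList :=
            (PySem.Chars.startswith_iff _ _).mp hpred
          have hlen : n.toList.length ≤ phase.toList.length := hpre.length_le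
          have h17 := (pvNeedleLen (n, L) hmem').2
          simp only at h17
          rw [pvProbeSome hmem' hpre _ (min_le_left _ _)
            (le_min hlen (by rw [pvMax17]; exact h17))]
          rfl
      | none =>
          have hnone : ∀ p ∈ NEEDLE_LANE, ¬ p.1.toList <+: phase.toList := by
            intro p hp habs
            have h0 := List.find?_eq_none.mp hf p hp
            simp only [PySem.Str.startswith_eq] at h0
            exact h0 ((PySem.Chars.startswith_iff _ _).mpr habs)
          rw [pvProbeNone hnone _ (min_le_left _ _)]
          rfl
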